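-- pv_equiv track=rewrite | github.com/Dyr-El/advent_of_code | 2025/Dyr-El-python/d2025_06.py | part1
-- ===== SOURCE A (Python) =====
-- from functools import reduce
--
-- def parse_input(inp):
--     return [[int(x) if x.strip().isdigit() else x for x in line.split()] for line in inp.splitlines()]
--
-- def part1(inp):
--     data = parse_input(inp)
--     total = 0
--     for x in range(len(data[0])):
--         if data[-1][x] == "*":
--             total += reduce(lambda a, b: a * b, [data[y][x] for y in range(len(data)-1)], 1)
--         elif data[-1][x] == "+":
--             total += sum([data[y][x] for y in range(len(data)-1)])
--     return total
-- ===== SOURCE B (Python) =====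
-- def part1(inp):
--     lines = inp.splitlines()
--     ops = lines[-1].split()
--     width = len(lines[0].split())
--     want = {}
--     for i, op in enumerate(ops):
--         if i < width and (op == "*" or op == "+"):
--             want[i] = op
--     acc = {}
--     for line in lines[:-1]:
--         for i, t in enumerate(line.split()):
--             op = want.get(i)
--             if op is not None:
--                 v = acc.get(i)
--                 if v is None:
--                     acc[i] = int(t)
--                 elif op == "*":
--                     acc[i] = v * int(t)
--                 else:
--                     acc[i] = v + int(t)
--     total = 0
--     for i, op in want.items():
--         total += acc.get(i, 1 if op == "*" else 0)
--     return total
-- ===== Notes on version B (the rewrite author's own statement) =====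
-- stated objective: alternative
-- what changed: B replaces A's column-major nested loops (for each column, re-scan all rows with reduce/sum) by a single row-major streaming pass over the cells that maintains per-column running accumulators in a dict keyed by column index, selected by an operator dict built first; a final fold over that dict yields the total.
import Mathlib
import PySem

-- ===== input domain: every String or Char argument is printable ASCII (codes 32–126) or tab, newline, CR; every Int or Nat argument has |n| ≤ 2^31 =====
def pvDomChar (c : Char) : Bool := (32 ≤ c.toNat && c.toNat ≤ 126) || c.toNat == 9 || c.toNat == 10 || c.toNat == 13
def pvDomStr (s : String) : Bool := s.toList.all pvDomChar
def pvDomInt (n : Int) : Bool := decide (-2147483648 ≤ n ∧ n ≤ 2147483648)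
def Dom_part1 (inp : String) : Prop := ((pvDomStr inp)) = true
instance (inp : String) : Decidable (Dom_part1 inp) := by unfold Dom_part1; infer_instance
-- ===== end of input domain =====

-- B makes one row-major streaming pass keeping per-column accumulators in a dict (keyed by column index,
-- selected by an operator dict built first) instead of A's column-major nested loops; objective: alternative.

-- ===== PORT A =====
-- a Python cell is either an int or a str
inductive Tok where
  | int : Int → Tok
  | str : String → Tok
deriving DecidableEq, Repr

-- 'int(x) if x.strip().isdigit() else x' (ofStr? is some on every digit string, so getD 0 is never the value used)
def pvTok (x : String) : Tok :=
  if PySem.Str.strIsdigit (PySem.Str.strip x) then Tok.int ((PySem.Int.ofStr? x).getD 0) else Tok.str x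

def pvParseInput (inp : String) : List (List Tok) :=
  (PySem.Str.splitlines inp).map (fun line => (PySem.Str.split₀ line).map pvTok)

-- Python's a * b / a + b on cells: int op int; any other operand combination raises in Python (outside Pre_)
def pvTokMul : Tok → Tok → Tok
  | Tok.int a, Tok.int b => Tok.int (a * b)
  | a, _ => a
def pvTokAdd : Tok → Tok → Tok
  | Tok.int a, Tok.int b => Tok.int (a + b)
  | a, _ => a
-- 'total += v' needs an int v; a str here raises in Python (outside Pre_)
def pvTokVal : Tok → Int
  | Tok.int n => n
  | Tok.str _ => 0

def part1 (inp : String) : Int :=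
  let data := pvParseInput inp
  (List.range (PySem.List.pyGetD data (0 : Int) []).length).foldl (fun (total : Int) (x : Nat) =>
    if PySem.List.pyGetD (PySem.List.pyGetD data (-1 : Int) []) (x : Int) (Tok.str "") = Tok.str "*" then
      total + pvTokVal (((List.range (data.length - 1)).map
        (fun (y : Nat) => PySem.List.pyGetD (PySem.List.pyGetD data (y : Int) []) (x : Int) (Tok.str ""))).foldl
          pvTokMul (Tok.int 1))
    else if PySem.List.pyGetD (PySem.List.pyGetD data (-1 : Int) []) (x : Int) (Tok.str "") = Tok.str "+" then
      total + pvTokVal (((List.range (data.length - 1)).map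
        (fun (y : Nat) => PySem.List.pyGetD (PySem.List.pyGetD data (y : Int) []) (x : Int) (Tok.str ""))).foldl
          pvTokAdd (Tok.int 0))
    else total) 0

-- ===== PORT B =====
-- 'if i < width and (op == "*" or op == "+"): want[i] = op'
def pvWantStep (width : Nat) (d : PySem.Dict Int String) (p : Int × String) : PySem.Dict Int String :=
  if p.1 < (width : Int) ∧ (p.2 = "*" ∨ p.2 = "+") then d.insert p.1 p.2 else d

-- the body of the inner 'for i, t in enumerate(line.split())' loop
def pvCellStep (want : PySem.Dict Int String) (a : PySem.Dict Int Int) (p : Int × String) :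
    PySem.Dict Int Int :=
  match want.get? p.1 with
  | some op =>
    match a.get? p.1 with
    | none => a.insert p.1 ((PySem.Int.ofStr? p.2).getD 0)
    | some v => a.insert p.1 (if op = "*" then v * (PySem.Int.ofStr? p.2).getD 0
                              else v + (PySem.Int.ofStr? p.2).getD 0)
  | none => a

-- one body line of 'for line in lines[:-1]'
def pvRowStep (want : PySem.Dict Int String) (a : PySem.Dict Int Int) (line : String) :
    PySem.Dict Int Int :=
  (PySem.List.enumerate (PySem.Str.split₀ line) 0).foldl (pvCellStep want) a

def part1_alt (inp : String) : Int :=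
  let lines := PySem.Str.splitlines inp
  let ops := PySem.Str.split₀ (PySem.List.pyGetD lines (-1 : Int) "")
  let width := (PySem.Str.split₀ (PySem.List.pyGetD lines (0 : Int) "")).length
  let want := (PySem.List.enumerate ops 0).foldl (pvWantStep width) PySem.Dict.empty
  let acc := (PySem.List.slice lines none (some (-1))).foldl (pvRowStep want) PySem.Dict.empty
  want.items.foldl (fun (total : Int) p =>
    total + acc.getD p.1 (if p.2 = "*" then 1 else 0)) 0

-- ===== PRECONDITION & SPEC =====
-- Pre_ is exactly where A returns: at least one line, the last row reaches every column of row 0, and every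
-- '*'/'+' column is present and all-digits in every row above (otherwise A raises IndexError/TypeError).
def Pre_part1 (inp : String) : Prop :=
  let rows := (PySem.Str.splitlines inp).map PySem.Str.split₀
  rows ≠ [] ∧ ∀ x < (rows.getD 0 []).length,
    x < (rows.getLast?.getD []).length ∧
    (((rows.getLast?.getD []).getD x "" = "*" ∨ (rows.getLast?.getD []).getD x "" = "+") →
      ∀ y < rows.length - 1,
        x < (rows.getD y []).length ∧ PySem.Str.strIsdigit (PySem.Str.strip ((rows.getD y []).getD x "")) = true)

instance (inp : String) : Decidable (Pre_part1 inp) := by unfold Pre_part1; infer_instance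

def pvWitness_part1 : String := "1 2\n3 4\n* +"

def Spec_part1 (inp : String) (out : Int) : Prop := out = part1_alt inp
instance (inp : String) (out : Int) : Decidable (Spec_part1 inp out) := by unfold Spec_part1; infer_instance

-- ===== CLAIM (what is proved, stated in full; the proofs are below) =====
def Claim_equal_part1 : Prop := ∀ (inp : String), Dom_part1 inp → Pre_part1 inp → Spec_part1 inp (part1 inp)

-- ===== LEMMAS AND PROOFS =====

theorem pvWitness_ok : Dom_part1 pvWitness_part1 ∧ Pre_part1 pvWitness_part1 := by decide

-- combining an optional running accumulator with the next cell value (B's three-way branch)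
def pvComb (o : Option Int) (op : String) (t : Int) : Int :=
  match o with
  | none => t
  | some v => if op = "*" then v * t else v + t

-- Python's l[-1] on a nonempty list is the last element
theorem pyGetD_neg_one {α : Type} (l : List α) (d : α) (h : l ≠ []) :
    PySem.List.pyGetD l (-1) d = l.getD (l.length - 1) d := by
  have hl : 0 < l.length := List.length_pos_iff.mpr h
  simp only [PySem.List.pyGetD, PySem.List.pyGet?, PySem.List.pyIdx?]
  rw [if_neg (by omega), if_pos (by omega)]
  simp [List.getD]

-- indexing a pvTok-mapped row, with matching defaults (pvTok "" = Tok.str "")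
theorem getD_map_tok (l : List String) (i : Nat) :
    (l.map pvTok).getD i (Tok.str "") = pvTok (l.getD i "") := by
  rcases h : l[i]? with _ | s
  · simp [List.getD, List.getElem?_map, h]; decide
  · simp [List.getD, List.getElem?_map, h]

-- indexing the line list through split₀, with matching defaults (split₀ "" = [])
theorem getD_map_split (ls : List String) (i : Nat) :
    (ls.map PySem.Str.split₀).getD i [] = PySem.Str.split₀ (ls.getD i "") := by
  rcases h : ls[i]? with _ | s
  · simp [List.getD, List.getElem?_map, h]; decide
  · simp [List.getD, List.getElem?_map, h]

-- 'for y in range(k): l[y]' is l.take k when k is in range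
theorem range_map_getD {α β : Type} (l : List α) (k : Nat) (hk : k ≤ l.length) (g : α → β) (d : α) :
    (List.range k).map (fun y => g (l.getD y d)) = (l.take k).map g := by
  apply List.ext_getElem
  · simp [hk]
  · intro i h1 h2
    have hi : i < k := by simpa using h1
    have hil : i < l.length := lt_of_lt_of_le hi hk
    simp [List.getD, List.getElem?_eq_getElem hil]

-- a parsed cell equals a non-digit string iff the raw cell does
theorem pvTok_eq_str_op (t op : String)
    (hop : PySem.Str.strIsdigit (PySem.Str.strip op) = false) :
    (pvTok t = Tok.str op) ↔ t = op := by
  unfold pvTok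
  split_ifs with h
  · constructor
    · intro h'; cases h'
    · intro h'; subst h'; rw [h] at hop; cases hop
  · simp

theorem pvTok_int_of_digit (s : String) (h : PySem.Str.strIsdigit (PySem.Str.strip s) = true) :
    pvTok s = Tok.int ((PySem.Int.ofStr? s).getD 0) := by unfold pvTok; rw [if_pos h]

-- the reduce(mul) loop over all-digit cells is an int product loop
theorem pvMulFold (ss : List String) (a : Int)
    (h : ∀ s ∈ ss, PySem.Str.strIsdigit (PySem.Str.strip s) = true) :
    (ss.map pvTok).foldl pvTokMul (Tok.int a)
      = Tok.int (ss.foldl (fun p s => p * (PySem.Int.ofStr? s).getD 0) a) := by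
  induction ss generalizing a with
  | nil => rfl
  | cons s t ih =>
    simp only [List.map_cons, List.foldl_cons]
    rw [pvTok_int_of_digit s (h s (by simp))]
    exact ih _ (fun s hs => h s (by simp [hs]))

-- the sum() loop over all-digit cells is an int sum
theorem pvAddFold (ss : List String) (a : Int)
    (h : ∀ s ∈ ss, PySem.Str.strIsdigit (PySem.Str.strip s) = true) :
    (ss.map pvTok).foldl pvTokAdd (Tok.int a)
      = Tok.int (a + (ss.map (fun s => (PySem.Int.ofStr? s).getD 0)).sum) := by
  induction ss generalizing a with
  | nil => simp
  | cons s t ih =>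
    simp only [List.map_cons, List.foldl_cons]
    rw [pvTok_int_of_digit s (h s (by simp))]
    rw [show pvTokAdd (Tok.int a) (Tok.int ((PySem.Int.ofStr? s).getD 0))
          = Tok.int (a + (PySem.Int.ofStr? s).getD 0) from rfl]
    rw [ih _ (fun s hs => h s (by simp [hs])), List.sum_cons]
    rw [add_assoc]

-- indexing the parsed grid row-wise, with matching defaults
theorem getD_map_row (rows : List (List String)) (i : Nat) :
    (rows.map (List.map pvTok)).getD i [] = (rows.getD i []).map pvTok := by
  rcases h : rows[i]? with _ | r
  · simp [List.getD, List.getElem?_map, h]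
  · simp [List.getD, List.getElem?_map, h]

-- a cell step leaves every other key unchanged
theorem cellStep_get?_ne (w : PySem.Dict Int String) (a : PySem.Dict Int Int)
    (s j : Int) (t : String) (hj : j ≠ s) :
    (pvCellStep w a (s, t)).get? j = a.get? j := by
  unfold pvCellStep
  rcases w.get? s with _ | op
  · rfl
  · rcases a.get? s with _ | v
    · exact PySem.Dict.get?_insert_of_ne _ _ hj
    · exact PySem.Dict.get?_insert_of_ne _ _ hj

-- B's inner loop over one enumerated row: lookups after the fold
theorem rowStep_get? (w : PySem.Dict Int String) (r : List String) (s : Int)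
    (a : PySem.Dict Int Int) (j : Int) :
    ((PySem.List.enumerate r s).foldl (pvCellStep w) a).get? j =
      if s ≤ j ∧ j < s + r.length ∧ (w.get? j).isSome then
        some (pvComb (a.get? j) ((w.get? j).getD "")
          ((PySem.Int.ofStr? (r.getD (j - s).toNat "")).getD 0))
      else a.get? j := by
  induction r generalizing s a with
  | nil =>
    rw [PySem.List.enumerate_nil, List.foldl_nil, if_neg]
    intro ⟨h1, h2, _⟩
    simp only [List.length_nil, Nat.cast_zero, add_zero] at h2
    omega
  | cons t rest ih =>
    rw [PySem.List.enumerate_cons, List.foldl_cons, ih]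
    by_cases hj : j = s
    · subst hj
      rw [if_neg (by intro ⟨h1, _, _⟩; omega)]
      show (pvCellStep w a (j, t)).get? j = _
      unfold pvCellStep
      rcases hw : w.get? j with _ | op
      · rw [if_neg (by simp)]
      · simp only [Option.isSome_some, Option.getD_some]
        rw [if_pos ⟨le_refl _, by simp only [List.length_cons]; push_cast; omega, trivial⟩]
        have hidx : ((j - j).toNat) = 0 := by omega
        rw [hidx]
        simp only [List.getD_cons_zero]
        rcases ha : a.get? j with _ | v
        · rw [PySem.Dict.get?_insert_self]; rfl
        · rw [PySem.Dict.get?_insert_self]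
          simp [pvComb]
    · rw [cellStep_get?_ne w a s j t hj]
      by_cases hc : s + 1 ≤ j ∧ j < s + 1 + (rest.length : Int) ∧ (w.get? j).isSome
      · obtain ⟨h1, h2, h3⟩ := hc
        rw [if_pos ⟨h1, h2, h3⟩, if_pos ⟨by omega, by simp only [List.length_cons]; push_cast; omega, h3⟩]
        have hidx : (j - s).toNat = (j - (s + 1)).toNat + 1 := by omega
        rw [hidx, List.getD_cons_succ]
      · rw [if_neg hc, if_neg]
        intro ⟨h1, h2, h3⟩
        apply hc
        refine ⟨by omega, ?_, h3⟩
        simp only [List.length_cons] at h2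
        push_cast at h2 ⊢; omega

-- B's pass over the body lines, at a key the operator dict contains
theorem bodyFold_get? (w : PySem.Dict Int String) (ls : List String)
    (a : PySem.Dict Int Int) (j : Int) (op : String) (hw : w.get? j = some op)
    (hlen : ∀ line ∈ ls, 0 ≤ j ∧ j < ((PySem.Str.split₀ line).length : Int)) :
    ((ls.foldl (pvRowStep w) a).get? j)
      = (ls.map (fun line =>
          (PySem.Int.ofStr? ((PySem.Str.split₀ line).getD j.toNat "")).getD 0)).foldl
          (fun o t => some (pvComb o op t)) (a.get? j) := by
  induction ls generalizing a with
  | nil => rfl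
  | cons line rest ih =>
    simp only [List.foldl_cons, List.map_cons]
    rw [ih _ (fun l hl => hlen l (by simp [hl]))]
    have h1 := hlen line (by simp)
    have hstep : (pvRowStep w a line).get? j = some (pvComb (a.get? j) op
        ((PySem.Int.ofStr? ((PySem.Str.split₀ line).getD j.toNat "")).getD 0)) := by
      unfold pvRowStep
      rw [rowStep_get?]
      rw [if_pos ⟨h1.1, by omega, by simp [hw]⟩]
      rw [hw]
      simp only [Option.getD_some]
      have hj0 : (j - 0) = j := by omega
      rw [hj0]
    rw [hstep]

-- the optional fold, once seeded, is a plain int fold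
theorem optFold_some (vs : List Int) (x : Int) (op : String) :
    vs.foldl (fun o t => some (pvComb o op t)) (some x)
      = some (vs.foldl (fun v t => if op = "*" then v * t else v + t) x) := by
  induction vs generalizing x with
  | nil => rfl
  | cons v t ih => simp only [List.foldl_cons]; exact ih _


-- B's accumulator after the whole body pass, at a key the operator dict maps to opx
theorem accAt (want : PySem.Dict Int String) (ls : List String) (i : Nat) (opx : String)
    (hw : want.get? (i : Int) = some opx)
    (hlen : ∀ line ∈ ls, 0 ≤ (i : Int) ∧ (i : Int) < ((PySem.Str.split₀ line).length : Int)) :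
    ((ls.foldl (pvRowStep want) PySem.Dict.empty).getD (i : Int) (if opx = "*" then 1 else 0))
      = (if opx = "*" then
          (ls.map (fun line =>
            (PySem.Int.ofStr? ((PySem.Str.split₀ line).getD i "")).getD 0)).foldl (· * ·) 1
        else
          0 + (ls.map (fun line =>
            (PySem.Int.ofStr? ((PySem.Str.split₀ line).getD i "")).getD 0)).sum) := by
  have hbody := bodyFold_get? want ls PySem.Dict.empty (i : Int) opx hw hlen
  rw [PySem.Dict.get?_empty] at hbody
  rw [PySem.Dict.getD_eq_get?_getD, hbody]
  rw [show ((i : Int)).toNat = i from Int.toNat_natCast i]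
  rcases hV : ls.map (fun line =>
      (PySem.Int.ofStr? ((PySem.Str.split₀ line).getD i "")).getD 0) with _ | ⟨v, vs⟩
  · simp only [List.foldl_nil, Option.getD_none]
    split_ifs <;> simp
  · simp only [List.foldl_cons]
    have hfirst : (some (pvComb none opx v)) = some v := rfl
    rw [hfirst, optFold_some, Option.getD_some]
    by_cases h : opx = "*"
    · subst h
      simp only [one_mul, if_true]
    · rw [if_neg h]
      have hfn : (fun (v t : Int) => if opx = "*" then v * t else v + t) = fun v t => v + t := by
        funext a b; rw [if_neg h]
      rw [hfn, List.sum_cons, PySem.List.foldl_add vs (fun t => t) v]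
      simp

-- sum over a filtered list is the sum of a guarded map
theorem sum_map_filter_ite {α : Type} (l : List α) (q : α → Prop) [DecidablePred q] (g : α → Int) :
    ((l.filter (fun p => decide (q p))).map g).sum
      = (l.map (fun p => if q p then g p else 0)).sum := by
  induction l with
  | nil => rfl
  | cons a t ih => by_cases h : q a <;> simp [h, ih]

-- the operator-dict loop builds exactly the filtered enumerate list as its items
theorem wantItems (ops : List String) (n : Nat) :
    ((PySem.List.enumerate ops 0).foldl (pvWantStep n) PySem.Dict.empty).items
      = (PySem.List.enumerate ops 0).filter
          (fun p => decide (p.1 < (n : Int) ∧ (p.2 = "*" ∨ p.2 = "+"))) := by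
  unfold pvWantStep
  rw [PySem.List.foldl_ite_eq_foldl_filter]
  have hpw : ((PySem.List.enumerate ops 0).filter
      (fun p => decide (p.1 < (n : Int) ∧ (p.2 = "*" ∨ p.2 = "+")))).Pairwise
        (fun p q => p.1 < q.1) :=
    (PySem.List.pairwise_lt_enumerate ops 0).filter _
  have hnd : (((PySem.List.enumerate ops 0).filter
      (fun p => decide (p.1 < (n : Int) ∧ (p.2 = "*" ∨ p.2 = "+")))).map (fun p => p.1)).Nodup :=
    (List.pairwise_map.mpr hpw).imp (fun h => h.ne)
  have h := PySem.Dict.items_foldl_insert_fresh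
      (l := (PySem.List.enumerate ops 0).filter
          (fun p => decide (p.1 < (n : Int) ∧ (p.2 = "*" ∨ p.2 = "+"))))
      (k := fun p => p.1) (v := fun p => p.2) (d := PySem.Dict.empty)
      (by intro a _; exact PySem.Dict.contains_empty _) hnd
  simpa using h

-- ===== VERDICT (by name: the statement is the Claim_ definition above) =====
theorem part1_spec : Claim_equal_part1 := by
  intro inp _hdom hpre
  unfold Spec_part1
  unfold Pre_part1 at hpre
  set ls := PySem.Str.splitlines inp with hls
  set rows := ls.map PySem.Str.split₀ with hrows
  obtain ⟨hne, hx⟩ := hpre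
  set L := rows.length with hLdef
  have hL : 0 < L := List.length_pos_iff.mpr hne
  have hlsne : ls ≠ [] := by
    intro h; apply hne; rw [hrows, h]; rfl
  have hlsL : ls.length = L := by rw [hLdef, hrows, List.length_map]
  set lastRaw := rows.getD (L - 1) [] with hlastdef
  have hlast : rows.getLast?.getD [] = lastRaw := by
    rw [List.getLast?_eq_getElem?]; rfl
  set n := (rows.getD 0 []).length with hndef
  have hnops : n ≤ lastRaw.length := by
    by_cases h0 : n = 0
    · omega
    · have := (hx (n - 1) (by omega)).1
      rw [hlast] at this; omega
  -- digit tokens where the op row says * or +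
  have hdig : ∀ x < n, (lastRaw.getD x "" = "*" ∨ lastRaw.getD x "" = "+") →
      ∀ s ∈ (List.range (L - 1)).map (fun y => (rows.getD y []).getD x ""),
        PySem.Str.strIsdigit (PySem.Str.strip s) = true := by
    intro x hxn hop s hs
    obtain ⟨y, hy, hys⟩ := List.mem_map.mp hs
    rw [List.mem_range] at hy
    rw [← hys]
    exact ((hx x hxn).2 (by rw [hlast]; exact hop) y hy).2
  have hcol : ∀ x < n, (lastRaw.getD x "" = "*" ∨ lastRaw.getD x "" = "+") →
      ∀ y < L - 1, x < (rows.getD y []).length := by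
    intro x hxn hop y hy
    exact ((hx x hxn).2 (by rw [hlast]; exact hop) y hy).1
  -- ===== normalise port A to a sum over range n =====
  have h0 : PySem.List.pyGetD (rows.map (List.map pvTok)) (0 : Int) [] = (rows.getD 0 []).map pvTok := by
    rw [PySem.List.pyGetD_of_nonneg _ _ (by norm_num)]
    simpa using getD_map_row rows 0
  have hm1 : PySem.List.pyGetD (rows.map (List.map pvTok)) (-1 : Int) [] = lastRaw.map pvTok := by
    rw [pyGetD_neg_one _ _ (by simpa using hne), List.length_map, getD_map_row]
  have hyx : ∀ (y x : Nat), PySem.List.pyGetD (PySem.List.pyGetD (rows.map (List.map pvTok)) (y : Int) []) (x : Int) (Tok.str "")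
      = pvTok ((rows.getD y []).getD x "") := by
    intro y x
    rw [PySem.List.pyGetD_natCast, PySem.List.pyGetD_natCast, getD_map_row, getD_map_tok]
  have hx1 : ∀ (x : Nat), PySem.List.pyGetD (lastRaw.map pvTok) (x : Int) (Tok.str "")
      = pvTok (lastRaw.getD x "") := by
    intro x
    rw [PySem.List.pyGetD_natCast, getD_map_tok]
  have hA : part1 inp = ((List.range n).map (fun x =>
      if pvTok (lastRaw.getD x "") = Tok.str "*" then
        pvTokVal (((List.range (L - 1)).map (fun y => pvTok ((rows.getD y []).getD x ""))).foldl
          pvTokMul (Tok.int 1))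
      else if pvTok (lastRaw.getD x "") = Tok.str "+" then
        pvTokVal (((List.range (L - 1)).map (fun y => pvTok ((rows.getD y []).getD x ""))).foldl
          pvTokAdd (Tok.int 0))
      else 0)).sum := by
    have hdata : pvParseInput inp = rows.map (List.map pvTok) := by
      rw [hrows, List.map_map]; rfl
    unfold part1
    rw [hdata]
    simp only [h0, hm1, hyx, hx1, List.length_map, ← hLdef, ← hndef]
    rw [PySem.List.foldl_congr_mem _ _ (fun (total : Int) (x : Nat) =>
      total + (if pvTok (lastRaw.getD x "") = Tok.str "*" then
        pvTokVal (((List.range (L - 1)).map (fun y => pvTok ((rows.getD y []).getD x ""))).foldl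
          pvTokMul (Tok.int 1))
      else if pvTok (lastRaw.getD x "") = Tok.str "+" then
        pvTokVal (((List.range (L - 1)).map (fun y => pvTok ((rows.getD y []).getD x ""))).foldl
          pvTokAdd (Tok.int 0))
      else 0)) _ ?_]
    · rw [PySem.List.foldl_add, zero_add]
    · intro acc x _
      simp only [List.getD]
      split_ifs <;> simp
  -- ===== normalise port B =====
  have hops : PySem.Str.split₀ (PySem.List.pyGetD ls (-1 : Int) "") = lastRaw := by
    rw [pyGetD_neg_one _ _ hlsne, hlsL, hlastdef, hrows, getD_map_split]
  have hwidth : (PySem.Str.split₀ (PySem.List.pyGetD ls (0 : Int) "")).length = n := by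
    rw [show ((0 : Int)) = ((0 : Nat) : Int) by norm_num, PySem.List.pyGetD_natCast,
      hndef, hrows, getD_map_split]
  set cond : Int × String → Prop := fun p => p.1 < (n : Int) ∧ (p.2 = "*" ∨ p.2 = "+") with hconddef
  set wl := (PySem.List.enumerate lastRaw 0).filter (fun p => decide (cond p)) with hwl
  set want := (PySem.List.enumerate lastRaw 0).foldl (pvWantStep n) PySem.Dict.empty with hwant
  have hitems : want.items = wl := wantItems lastRaw n
  have hkeysnd : want.keys.Nodup := by
    have : want.keys = wl.map (fun p => p.1) := by
      simp only [PySem.Dict.keys, hitems]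
    rw [this]
    have hpw : wl.Pairwise (fun p q => p.1 < q.1) :=
      (PySem.List.pairwise_lt_enumerate lastRaw 0).filter _
    exact (List.pairwise_map.mpr hpw).imp (fun h => h.ne)
  have hget : ∀ k v, (k, v) ∈ wl → want.get? k = some v := by
    intro k v hkv
    exact PySem.Dict.get?_of_mem_items _ (by rw [hitems]; exact hkv) hkeysnd
  set acc := (ls.dropLast).foldl (pvRowStep want) PySem.Dict.empty with hacc
  have hB : part1_alt inp = (wl.map (fun p =>
      acc.getD p.1 (if p.2 = "*" then 1 else 0))).sum := by
    simp only [part1_alt]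
    rw [← hls]
    simp only [hops, hwidth]
    rw [PySem.List.slice_to_neg_one]
    rw [← hwant, ← hacc, hitems]
    rw [PySem.List.foldl_add wl (fun p => acc.getD p.1 (if p.2 = "*" then 1 else 0)) 0, zero_add]
  rw [hA, hB]
  clear_value acc want wl lastRaw n L rows ls
  -- ===== wl is the filtered first-n-columns list =====
  have htake : (lastRaw.take n).length = n := by simp [hnops]
  have hwl' : wl = (PySem.List.enumerate (lastRaw.take n) 0).filter
      (fun p => decide (p.2 = "*" ∨ p.2 = "+")) := by
    rw [hwl]
    conv_lhs => rw [← List.take_append_drop n lastRaw]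
    rw [PySem.List.enumerate_append, List.filter_append, htake]
    have hdrop : ((PySem.List.enumerate (lastRaw.drop n) ((0 : Int) + n)).filter
        (fun p => decide (cond p))) = [] := by
      apply List.filter_eq_nil_iff.mpr
      intro p hp
      obtain ⟨k, hk, hpk⟩ := (PySem.List.mem_enumerate_iff _ _ _).mp hp
      simp only [hpk, hconddef]
      simp only [decide_eq_true_eq, not_and]
      intro hlt
      omega
    rw [hdrop, List.append_nil]
    apply List.filter_congr
    intro p hp
    obtain ⟨k, hk, hpk⟩ := (PySem.List.mem_enumerate_iff _ _ _).mp hp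
    rw [htake] at hk
    simp only [hpk, hconddef, decide_eq_decide]
    constructor
    · intro h; exact h.2
    · intro h; exact ⟨by omega, h⟩
  rw [hwl', sum_map_filter_ite]
  -- ===== termwise equality =====
  apply congrArg List.sum
  apply List.ext_getElem (by simp [htake])
  intro i hi1 hi2
  simp only [List.getElem_map, List.getElem_range, PySem.List.getElem_enumerate]
  have hin : i < n := by simpa [htake] using hi2
  have hgetl : (lastRaw.take n)[i]'(by omega) = lastRaw.getD i "" := by
    rw [List.getElem_take]
    simp [List.getD, List.getElem?_eq_getElem (by omega : i < lastRaw.length)]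
  rw [hgetl]
  set opx := lastRaw.getD i "" with hopx
  -- B's accumulator at a wanted column i
  have hrowsdrop : ls.dropLast.map PySem.Str.split₀ = rows.dropLast := by
    rw [hrows, List.map_dropLast]
  have hvals : (ls.dropLast.map (fun line =>
      (PySem.Int.ofStr? ((PySem.Str.split₀ line).getD i "")).getD 0))
      = (List.range (L - 1)).map (fun y =>
          (PySem.Int.ofStr? ((rows.getD y []).getD i "")).getD 0) := by
    rw [range_map_getD rows (L - 1) (by omega)
      (fun r => (PySem.Int.ofStr? (r.getD i "")).getD 0) [], hLdef]
    rw [← List.dropLast_eq_take, ← hrowsdrop, List.map_map]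
    rfl
  have hterm : ∀ hop : (opx = "*" ∨ opx = "+"),
      acc.getD ((0 : Int) + (i : Int)) (if opx = "*" then 1 else 0)
        = (if opx = "*" then
            ((List.range (L - 1)).map (fun y =>
              (PySem.Int.ofStr? ((rows.getD y []).getD i "")).getD 0)).foldl (· * ·) 1
          else
            0 + ((List.range (L - 1)).map (fun y =>
              (PySem.Int.ofStr? ((rows.getD y []).getD i "")).getD 0)).sum) := by
    intro hop
    have hmem : ((i : Int), opx) ∈ wl := by
      rw [hwl']
      apply List.mem_filter.mpr
      refine ⟨?_, by simpa using hop⟩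
      apply (PySem.List.mem_enumerate_iff _ _ _).mpr
      exact ⟨i, by rw [htake]; exact hin, by rw [hgetl]; simp⟩
    have hw : want.get? (i : Int) = some opx := hget _ _ hmem
    have hlen : ∀ line ∈ ls.dropLast, 0 ≤ (i : Int) ∧
        (i : Int) < ((PySem.Str.split₀ line).length : Int) := by
      intro line hline
      obtain ⟨y, hy, hyl⟩ := List.mem_iff_getElem.mp hline
      have hyL : y < L - 1 := by
        have := hy; rw [List.length_dropLast, hlsL] at this; exact this
      have hsplit : PySem.Str.split₀ line = rows.getD y [] := by
        rw [hrows, getD_map_split]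
        congr 1
        rw [← hyl, List.getElem_dropLast]
        simp [List.getD, List.getElem?_eq_getElem (by rw [hlsL]; omega : y < ls.length)]
      rw [hsplit]
      have := hcol i hin hop y hyL
      constructor
      · omega
      · exact_mod_cast this
    rw [zero_add, hacc, accAt want ls.dropLast i opx hw hlen, hvals]
  -- now split on the operator
  have hmaps : (List.range (L - 1)).map (fun y => (PySem.Int.ofStr? ((rows.getD y []).getD i "")).getD 0)
      = ((List.range (L - 1)).map (fun y => (rows.getD y []).getD i "")).map
          (fun s => (PySem.Int.ofStr? s).getD 0) := by
    rw [List.map_map]; simp only [Function.comp_def]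
  have hcomp : (List.range (L - 1)).map (fun y => pvTok ((rows.getD y []).getD i ""))
      = ((List.range (L - 1)).map (fun y => (rows.getD y []).getD i "")).map pvTok := by
    rw [List.map_map]; simp only [Function.comp_def]
  by_cases hstar : opx = "*"
  · rw [if_pos ((pvTok_eq_str_op _ _ (by decide)).mpr hstar), if_pos (Or.inl hstar),
        hterm (Or.inl hstar), if_pos hstar, hcomp,
        pvMulFold _ _ (hdig i hin (Or.inl hstar))]
    conv_rhs => rw [hmaps, List.foldl_map]
    rfl
  · by_cases hplus : opx = "+"
    · rw [if_neg (by rw [pvTok_eq_str_op _ _ (by decide)]; exact hstar),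
          if_pos ((pvTok_eq_str_op _ _ (by decide)).mpr hplus), if_pos (Or.inr hplus),
          hterm (Or.inr hplus), if_neg hstar, hcomp,
          pvAddFold _ _ (hdig i hin (Or.inr hplus)), hmaps]
      rfl
    · rw [if_neg (by rw [pvTok_eq_str_op _ _ (by decide)]; exact hstar),
          if_neg (by rw [pvTok_eq_str_op _ _ (by decide)]; exact hplus),
          if_neg (by rintro (h | h); exacts [hstar h, hplus h])]
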